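-- pv_equiv track=rewrite | github.com/pfarrergraf/Lausberg | scripts/paddle_batch_ocr_export.py | normalize_row_text
-- ===== SOURCE A (Python) =====
-- from typing import Iterable
--
-- def normalize_row_text(lines: Iterable[dict]) -> str:
--     parts: list[str] = []
--     for line in lines:
--         text = " ".join((line.get("text") or "").split())
--         if text:
--             parts.append(text)
--     row = " ".join(parts)
--     return row.replace(" ,", ",").replace(" .", ".").replace(" ;", ";").replace(" :", ":")
-- ===== SOURCE B (Python) =====
-- from typing import Iterable
--
-- def normalize_row_text(lines: Iterable[dict]) -> str:
--     out: list[str] = []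
--     sep = False  # a separating space is pending
--     for line in lines:
--         for ch in (line.get("text") or ""):
--             if ch.isspace():
--                 sep = sep or bool(out)
--             elif sep and ch in ",.;:":
--                 out.append(ch)
--                 sep = False
--             else:
--                 if sep:
--                     out.append(" ")
--                 out.append(ch)
--                 sep = False
--         sep = sep or bool(out)  # line boundary separates like whitespace
--     return "".join(out)
-- ===== Notes on version B (the rewrite author's own statement) =====
-- stated objective: alternative
-- what changed: B replaces A's multi-pass pipeline (per-line split/join, list of parts, second join, four .replace passes) by a single left-to-right character state machine with a pending-separator flag: whitespace runs and line boundaries set the flag, a punctuation character consumes it silently, any other character first emits the pending space; the punctuation replacements are never string searches.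
import Mathlib
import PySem

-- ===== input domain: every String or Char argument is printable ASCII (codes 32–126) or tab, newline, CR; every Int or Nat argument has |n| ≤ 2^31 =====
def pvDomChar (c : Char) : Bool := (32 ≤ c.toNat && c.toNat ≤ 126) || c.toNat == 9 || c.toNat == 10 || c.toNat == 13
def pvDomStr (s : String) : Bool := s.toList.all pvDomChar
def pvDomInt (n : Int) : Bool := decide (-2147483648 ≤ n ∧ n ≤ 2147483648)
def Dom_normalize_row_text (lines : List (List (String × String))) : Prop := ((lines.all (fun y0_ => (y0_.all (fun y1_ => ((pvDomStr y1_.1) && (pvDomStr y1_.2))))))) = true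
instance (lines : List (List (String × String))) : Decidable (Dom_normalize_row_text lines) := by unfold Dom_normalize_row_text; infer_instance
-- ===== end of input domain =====

-- B replaces A's multi-pass pipeline (per-line split/join, second join, four .replace passes)
-- by a single left-to-right character state machine with a pending-separator flag; same
-- asymptotic cost, a genuinely different algorithm (no string searches, one pass).


-- `line.get("text") or ""`: first-match lookup in the assoc-list dict (none and "" both give "")
def pvGetText (line : List (String × String)) : String :=
  match (line.find? (fun p => p.1 == "text")).map (·.2) with
  | none => ""
  | some s => if s = "" then "" else s

-- ===== PORT A =====
def normalize_row_text (lines : List (List (String × String))) : String :=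
  let parts := lines.foldl (fun parts line =>
      let text := PySem.Str.join " " (PySem.Str.split₀ (pvGetText line))
      if text ≠ "" then parts ++ [text] else parts) ([] : List String)
  let row := PySem.Str.join " " parts
  PySem.Str.replace (PySem.Str.replace (PySem.Str.replace (PySem.Str.replace row " ," ",") " ." ".") " ;" ";") " :" ":"

-- ===== PORT B =====
-- `ch in ",.;:"`
def pvPunct (c : Char) : Bool := c == ',' || c == '.' || c == ';' || c == ':'

-- one step of B's character state machine; state = (out, pending-separator flag)
def pvStep (st : List Char × Bool) (ch : Char) : List Char × Bool :=
  if PySem.Chars.isspace ch then (st.1, st.2 || !st.1.isEmpty)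
  else if st.2 && pvPunct ch then (st.1 ++ [ch], false)
  else ((if st.2 then st.1 ++ [' '] else st.1) ++ [ch], false)

def normalize_row_text_alt (lines : List (List (String × String))) : String :=
  let st := lines.foldl (fun st line =>
      let st := (pvGetText line).toList.foldl pvStep st
      (st.1, st.2 || !st.1.isEmpty)) (([], false) : List Char × Bool)
  String.ofList st.1

-- ===== PRECONDITION & SPEC =====
def Spec_normalize_row_text (lines : List (List (String × String))) (out : String) : Prop := out = normalize_row_text_alt lines
instance (lines : List (List (String × String))) (out : String) : Decidable (Spec_normalize_row_text lines out) := by unfold Spec_normalize_row_text; infer_instance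

-- ===== CLAIM (what is proved, stated in full; the proofs are below) =====
def Claim_equal_normalize_row_text : Prop := ∀ (lines : List (List (String × String))), Dom_normalize_row_text lines → Spec_normalize_row_text lines (normalize_row_text lines)

-- ===== LEMMAS AND PROOFS =====

-- the common normal form: fold the word list with the separator-aware step
def pvStepW (P : Char → Bool) (o w : List Char) : List Char :=
  if o = [] then w else if P (w.headD ' ') then o ++ w else o ++ ' ' :: w

def pvChunk (P : Char → Bool) (v : List Char) : List Char :=
  if P (v.headD ' ') then v else ' ' :: v

def pvJoinF (P : Char → Bool) : List (List Char) → List Char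
  | [] => []
  | w :: ws => w ++ ws.flatMap (pvChunk P)

-- delete every space immediately followed by p, scanning left to right
def pvDel (p : Char) : List Char → List Char
  | [] => []
  | [c] => [c]
  | c :: d :: t => if c = ' ' ∧ d = p then d :: pvDel p t else c :: pvDel p (d :: t)

-- ---- split₀ word facts ----

theorem pv_go_ne_nil : ∀ (s cur : List Char) (acc : List (List Char)),
    (∀ w ∈ acc, w ≠ []) → ∀ w ∈ PySem.Chars.split₀.go s cur acc, w ≠ [] := by
  intro s
  induction s with
  | nil =>
    intro cur acc hacc w hw
    unfold PySem.Chars.split₀.go at hw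
    by_cases hc : cur.isEmpty = true
    · simp only [hc, if_true, List.mem_reverse] at hw
      exact hacc w hw
    · simp [hc] at hw
      rcases hw with h | h
      · exact hacc w h
      · rw [h]
        simp only [ne_eq, List.reverse_eq_nil_iff]
        simpa [List.isEmpty_iff] using hc
  | cons c rest ih =>
    intro cur acc hacc w hw
    unfold PySem.Chars.split₀.go at hw
    by_cases hs : PySem.Chars.isspace c = true
    · simp only [hs, if_true] at hw
      by_cases hc : cur.isEmpty = true
      · simp only [hc, if_true] at hw
        exact ih [] acc hacc w hw
      · simp [hc] at hw
        refine ih [] (cur.reverse :: acc) ?_ w hw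
        intro v hv
        rw [List.mem_cons] at hv
        rcases hv with h | h
        · rw [h]
          simp only [ne_eq, List.reverse_eq_nil_iff]
          simpa [List.isEmpty_iff] using hc
        · exact hacc v h
    · simp only [hs] at hw
      exact ih (c :: cur) acc hacc w hw

theorem pv_split₀_ne_nil (s : List Char) : ∀ w ∈ PySem.Chars.split₀ s, w ≠ [] := by
  intro w hw
  exact pv_go_ne_nil s [] [] (by simp) w hw

theorem pv_go_nonspace : ∀ (s cur : List Char) (acc : List (List Char)),
    (∀ c ∈ cur, PySem.Chars.isspace c = false) →
    (∀ w ∈ acc, ∀ c ∈ w, PySem.Chars.isspace c = false) →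
    ∀ w ∈ PySem.Chars.split₀.go s cur acc, ∀ c ∈ w, PySem.Chars.isspace c = false := by
  intro s
  induction s with
  | nil =>
    intro cur acc hcur hacc w hw
    unfold PySem.Chars.split₀.go at hw
    by_cases hc : cur.isEmpty = true
    · simp only [hc, if_true, List.mem_reverse] at hw
      exact hacc w hw
    · simp [hc] at hw
      rcases hw with h | h
      · exact hacc w h
      · intro c hcw
        rw [h, List.mem_reverse] at hcw
        exact hcur c hcw
  | cons c rest ih =>
    intro cur acc hcur hacc w hw
    unfold PySem.Chars.split₀.go at hw
    by_cases hs : PySem.Chars.isspace c = true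
    · simp only [hs, if_true] at hw
      by_cases hc : cur.isEmpty = true
      · simp only [hc, if_true] at hw
        exact ih [] acc (by simp) hacc w hw
      · simp [hc] at hw
        refine ih [] (cur.reverse :: acc) (by simp) ?_ w hw
        intro v hv
        rw [List.mem_cons] at hv
        rcases hv with h | h
        · intro d hd
          rw [h, List.mem_reverse] at hd
          exact hcur d hd
        · exact hacc v h
    · simp only [hs] at hw
      refine ih (c :: cur) acc ?_ hacc w hw
      intro d hd
      rw [List.mem_cons] at hd
      rcases hd with h | h
      · rw [h]; simpa using hs
      · exact hcur d h

theorem pv_split₀_nonspace (s : List Char) :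
    ∀ w ∈ PySem.Chars.split₀ s, ∀ c ∈ w, PySem.Chars.isspace c = false := by
  intro w hw
  exact pv_go_nonspace s [] [] (by simp) (by simp) w hw

-- one-step unfoldings of split₀.go (definitional)
theorem pv_go_cons (c : Char) (rest cur : List Char) (acc : List (List Char)) :
    PySem.Chars.split₀.go (c :: rest) cur acc
      = if PySem.Chars.isspace c = true
        then (if cur.isEmpty = true then PySem.Chars.split₀.go rest [] acc
              else PySem.Chars.split₀.go rest [] (cur.reverse :: acc))
        else PySem.Chars.split₀.go rest (c :: cur) acc := rfl

-- acc of split₀.go factors out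
theorem pv_go_acc : ∀ (s cur : List Char) (acc : List (List Char)),
    PySem.Chars.split₀.go s cur acc = acc.reverse ++ PySem.Chars.split₀.go s cur [] := by
  intro s
  induction s with
  | nil =>
    intro cur acc
    unfold PySem.Chars.split₀.go
    by_cases hc : cur.isEmpty = true <;> simp [hc]
  | cons c rest ih =>
    intro cur acc
    unfold PySem.Chars.split₀.go
    by_cases hs : PySem.Chars.isspace c = true
    · by_cases hc : cur.isEmpty = true
      · simp only [hs, hc, if_true]
        exact ih [] acc
      · simp only [hs, hc, if_true, if_false]
        rw [ih [] (cur.reverse :: acc), ih [] [cur.reverse]]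
        simp
    · simp only [hs, if_false]
      exact ih (c :: cur) acc

-- ---- pvStepW / pvChunk basics ----

theorem pv_stepW_append (P : Char → Bool) (o w m : List Char) (hw : w ≠ []) :
    pvStepW P o (w ++ m) = pvStepW P o w ++ m := by
  obtain ⟨c, w', rfl⟩ := List.exists_cons_of_ne_nil hw
  unfold pvStepW
  by_cases ho : o = [] <;> simp [ho] <;> split_ifs <;> simp

theorem pv_stepW_ne_nil (P : Char → Bool) (o w : List Char) (hw : w ≠ []) :
    pvStepW P o w ≠ [] := by
  unfold pvStepW
  split_ifs <;> simp [hw]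

theorem pv_stepW_eq_chunk (P : Char → Bool) (o w : List Char) (ho : o ≠ []) :
    pvStepW P o w = o ++ pvChunk P w := by
  unfold pvStepW pvChunk
  split_ifs with h1 h2 <;> simp_all

theorem pv_foldl_stepW (P : Char → Bool) :
    ∀ (ws : List (List Char)) (o : List Char), o ≠ [] →
    List.foldl (pvStepW P) o ws = o ++ ws.flatMap (pvChunk P) := by
  intro ws
  induction ws with
  | nil => simp
  | cons w ws ih =>
    intro o ho
    rw [List.foldl_cons, pv_stepW_eq_chunk P o w ho, ih _ (by simp [ho])]
    simp

theorem pv_foldl_stepW_nil (P : Char → Bool) (ws : List (List Char))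
    (h : ∀ w ∈ ws, w ≠ []) :
    List.foldl (pvStepW P) [] ws = pvJoinF P ws := by
  cases ws with
  | nil => simp [pvJoinF]
  | cons w ws =>
    have hw : w ≠ [] := h w (by simp)
    rw [List.foldl_cons]
    show List.foldl (pvStepW P) (pvStepW P [] w) ws = _
    rw [show pvStepW P [] w = w by unfold pvStepW; simp,
        pv_foldl_stepW P ws w hw]
    rfl

-- ---- intercalate is pvJoinF (no punctuation absorbed) ----

theorem pv_ic_cons (sep x : List Char) (xs : List (List Char)) (h : xs ≠ []) :
    List.intercalate sep (x :: xs) = x ++ sep ++ List.intercalate sep xs := by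
  cases xs with
  | nil => exact absurd rfl h
  | cons y zs => simp [List.intercalate, List.intersperse]

theorem pv_ic_flat : ∀ (ws : List (List Char)) (w : List Char),
    List.intercalate [' '] (w :: ws) = w ++ ws.flatMap (fun v => ' ' :: v) := by
  intro ws
  induction ws with
  | nil => intro w; simp [List.intercalate]
  | cons v ws ih =>
    intro w
    rw [pv_ic_cons _ w _ (by simp), ih v]
    simp

theorem pv_ic_eq_joinF (ws : List (List Char)) :
    List.intercalate [' '] ws = pvJoinF (fun _ => false) ws := by
  have hch : pvChunk (fun _ => false) = fun v => ' ' :: v := by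
    funext v; simp [pvChunk]
  cases ws with
  | nil => simp [List.intercalate, pvJoinF]
  | cons w ws =>
    rw [pv_ic_flat ws w]
    simp [pvJoinF, hch]

-- ---- replace " p" -> "p" is pvDel ----

theorem pv_del_nonspace_cons (p c : Char) (t : List Char) (hc : c ≠ ' ') :
    pvDel p (c :: t) = c :: pvDel p t := by
  cases t with
  | nil => simp [pvDel]
  | cons d t' => simp [pvDel, hc]

theorem pv_del_match (p : Char) (t : List Char) :
    pvDel p (' ' :: p :: t) = p :: pvDel p t := by
  simp [pvDel]

theorem pv_del_nomatch (p d : Char) (t : List Char) (hd : d ≠ p) :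
    pvDel p (' ' :: d :: t) = ' ' :: pvDel p (d :: t) := by
  simp [pvDel, hd]

theorem pv_replace_go_eq_del (p : Char) :
    ∀ (fuel : Nat) (l acc : List Char), l.length ≤ fuel →
    PySem.Chars.replace.go [' ', p] [p] fuel l acc = acc.reverse ++ pvDel p l := by
  intro fuel
  induction fuel with
  | zero =>
    intro l acc hl
    have : l = [] := List.eq_nil_of_length_eq_zero (Nat.le_zero.mp hl)
    subst this
    simp [PySem.Chars.replace.go, pvDel]
  | succ fuel ih =>
    intro l acc hl
    match l, hl with
    | [], _ => simp [PySem.Chars.replace.go, pvDel]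
    | [c], _ =>
      rw [show PySem.Chars.replace.go [' ', p] [p] (fuel+1) [c] acc
            = if [' ', p].isPrefixOf [c] = true
              then PySem.Chars.replace.go [' ', p] [p] fuel (List.drop 2 [c]) ([p].reverse ++ acc)
              else PySem.Chars.replace.go [' ', p] [p] fuel [] (c :: acc) from rfl,
        show [' ', p].isPrefixOf [c] = ((' ' == c) && false) from rfl]
      simp only [Bool.and_false, Bool.false_eq_true, if_false]
      rw [ih [] (c :: acc) (by simp)]
      simp [pvDel]
    | c :: d :: t, hl =>
      have hlt : t.length ≤ fuel := by simp at hl; omega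
      rw [show PySem.Chars.replace.go [' ', p] [p] (fuel+1) (c :: d :: t) acc
            = if [' ', p].isPrefixOf (c :: d :: t) = true
              then PySem.Chars.replace.go [' ', p] [p] fuel (List.drop 2 (c :: d :: t)) ([p].reverse ++ acc)
              else PySem.Chars.replace.go [' ', p] [p] fuel (d :: t) (c :: acc) from rfl,
        show [' ', p].isPrefixOf (c :: d :: t) = ((' ' == c) && ((p == d) && true)) from rfl]
      by_cases hm : c = ' ' ∧ d = p
      · obtain ⟨rfl, rfl⟩ := hm
        simp only [BEq.rfl, Bool.and_self, Bool.true_and, if_true, List.drop_succ_cons,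
          List.drop_zero, List.reverse_cons, List.reverse_nil, List.nil_append]
        rw [show ([d] : List Char) ++ acc = d :: acc from rfl, ih t (d :: acc) hlt, pv_del_match]
        simp
      · have hb : ((' ' == c) && ((p == d) && true)) = false := by
          rcases Decidable.not_and_iff_not_or_not.mp hm with h | h
          · have hx : (' ' == c) = false := beq_eq_false_iff_ne.mpr (fun he => h he.symm)
            rw [hx, Bool.false_and]
          · have hx : (p == d) = false := beq_eq_false_iff_ne.mpr (fun he => h he.symm)
            rw [hx, Bool.false_and, Bool.and_false]
        rw [hb]
        simp only [Bool.false_eq_true, if_false]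
        rw [ih (d :: t) (c :: acc) (by simp at hl ⊢; omega)]
        by_cases hc : c = ' '
        · subst hc
          have hd : d ≠ p := fun hdp => hm ⟨rfl, hdp⟩
          rw [pv_del_nomatch p d t hd]
          simp
        · rw [pv_del_nonspace_cons p c (d :: t) hc]
          simp

theorem pv_replace_eq_del (p : Char) (s : List Char) :
    PySem.Chars.replace s [' ', p] [p] = pvDel p s := by
  unfold PySem.Chars.replace
  simp only [List.isEmpty_cons, if_false, Bool.false_eq_true]
  exact pv_replace_go_eq_del p s.length s [] (Nat.le_refl _)

-- ---- pvDel acting on pvJoinF ----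

theorem pv_del_append_nonspace (p : Char) :
    ∀ (w t : List Char), (∀ c ∈ w, PySem.Chars.isspace c = false) →
    pvDel p (w ++ t) = w ++ pvDel p t := by
  intro w
  induction w with
  | nil => simp
  | cons c w' ih =>
    intro t hw
    have hc : c ≠ ' ' := by
      intro hcs
      have := hw c (by simp)
      rw [hcs] at this
      simp [PySem.Chars.isspace] at this
    rw [List.cons_append, pv_del_nonspace_cons p c _ hc, ih t (fun d hd => hw d (by simp [hd]))]
    simp

theorem pv_del_flatMap (p : Char) (P : Char → Bool) :
    ∀ (ws : List (List Char)),
    (∀ w ∈ ws, w ≠ [] ∧ ∀ c ∈ w, PySem.Chars.isspace c = false) →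
    pvDel p (ws.flatMap (pvChunk P)) = ws.flatMap (pvChunk (fun c => P c || c == p)) := by
  intro ws
  induction ws with
  | nil => simp [pvDel]
  | cons w ws ih =>
    intro h
    obtain ⟨hw, hsp⟩ := h w (by simp)
    obtain ⟨c, w', rfl⟩ := List.exists_cons_of_ne_nil hw
    have htail : ∀ d ∈ w', PySem.Chars.isspace d = false := fun d hd => hsp d (by simp [hd])
    have hcns : c ≠ ' ' := by
      intro hcs
      have := hsp c (by simp)
      rw [hcs] at this
      simp [PySem.Chars.isspace] at this
    have hrest : ∀ v ∈ ws, v ≠ [] ∧ ∀ d ∈ v, PySem.Chars.isspace d = false :=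
      fun v hv => h v (by simp [hv])
    rw [List.flatMap_cons, List.flatMap_cons]
    by_cases hP : P c = true
    · rw [show pvChunk P (c :: w') = c :: w' by simp [pvChunk, hP],
          show pvChunk (fun d => P d || d == p) (c :: w') = c :: w' by simp [pvChunk, hP]]
      have h1 := pv_del_append_nonspace p (c :: w') (List.flatMap (pvChunk P) ws) hsp
      rw [List.cons_append] at h1 ⊢
      rw [h1, ih hrest]
    · have hPf : P c = false := by simpa using hP
      rw [show pvChunk P (c :: w') = ' ' :: c :: w' by simp [pvChunk, hPf]]
      by_cases hcp : c = p
      · rw [show pvChunk (fun d => P d || d == p) (c :: w') = c :: w' by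
              simp [pvChunk, hPf, hcp]]
        rw [show (' ' :: c :: w') ++ ws.flatMap (pvChunk P)
              = ' ' :: c :: (w' ++ ws.flatMap (pvChunk P)) by simp,
            hcp, pv_del_match, pv_del_append_nonspace p w' _ htail, ih hrest]
        rw [← hcp]
        simp
      · rw [show pvChunk (fun d => P d || d == p) (c :: w') = ' ' :: c :: w' by
              simp [pvChunk, hPf, hcp]]
        rw [show (' ' :: c :: w') ++ ws.flatMap (pvChunk P)
              = ' ' :: c :: (w' ++ ws.flatMap (pvChunk P)) by simp,
            pv_del_nomatch p c _ hcp, pv_del_nonspace_cons p c _ hcns,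
            pv_del_append_nonspace p w' _ htail, ih hrest]
        simp

theorem pv_del_joinF (p : Char) (P : Char → Bool) (ws : List (List Char))
    (h : ∀ w ∈ ws, w ≠ [] ∧ ∀ c ∈ w, PySem.Chars.isspace c = false) :
    pvDel p (pvJoinF P ws) = pvJoinF (fun c => P c || c == p) ws := by
  cases ws with
  | nil => simp [pvJoinF, pvDel]
  | cons w ws =>
    obtain ⟨hw, hsp⟩ := h w (by simp)
    unfold pvJoinF
    rw [pv_del_append_nonspace p w _ hsp,
        pv_del_flatMap p P ws (fun v hv => h v (by simp [hv]))]

-- ---- B's machine computes foldl pvStepW ----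

theorem pv_machine : ∀ (t : List Char),
    (∀ o : List Char,
      (t.foldl pvStep (o, !o.isEmpty)).1
        = List.foldl (pvStepW pvPunct) o (PySem.Chars.split₀.go t [] []))
    ∧ (∀ (cur o : List Char), cur ≠ [] →
      (t.foldl pvStep (pvStepW pvPunct o cur.reverse, false)).1
        = List.foldl (pvStepW pvPunct) o (PySem.Chars.split₀.go t cur [])) := by
  intro t
  induction t with
  | nil =>
    constructor
    · intro o
      simp [PySem.Chars.split₀.go]
    · intro cur o hcur
      have hc : cur.isEmpty = false := by simpa [List.isEmpty_iff] using hcur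
      simp [PySem.Chars.split₀.go, hc]
  | cons c rest ih =>
    obtain ⟨ih0, ih1⟩ := ih
    constructor
    · intro o
      by_cases hs : PySem.Chars.isspace c = true
      · rw [List.foldl_cons,
            show pvStep (o, !o.isEmpty) c = (o, !o.isEmpty) by
              simp [pvStep, hs]]
        rw [show PySem.Chars.split₀.go (c :: rest) [] []
              = PySem.Chars.split₀.go rest [] [] by
              rw [pv_go_cons]; simp [hs]]
        exact ih0 o
      · have hstep : pvStep (o, !o.isEmpty) c = (pvStepW pvPunct o [c], false) := by
          unfold pvStep pvStepW
          by_cases ho : o = []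
          · subst ho; simp [hs]
          · have hoe : o.isEmpty = false := by simpa [List.isEmpty_iff] using ho
            simp only [hs, if_false, Bool.false_eq_true, hoe, Bool.not_false, Bool.true_and]
            by_cases hp : pvPunct c = true
            · simp [hp, ho]
            · simp [hp, ho]
        rw [List.foldl_cons, hstep,
            show PySem.Chars.split₀.go (c :: rest) [] []
              = PySem.Chars.split₀.go rest [c] [] by
              rw [pv_go_cons]; simp [hs]]
        exact ih1 [c] o (by simp)
    · intro cur o hcur
      have hc : cur.isEmpty = false := by simpa [List.isEmpty_iff] using hcur
      by_cases hs : PySem.Chars.isspace c = true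
      · have hne : pvStepW pvPunct o cur.reverse ≠ [] :=
          pv_stepW_ne_nil pvPunct o cur.reverse (by simpa using hcur)
        have hoe : (pvStepW pvPunct o cur.reverse).isEmpty = false := by
          simpa [List.isEmpty_iff] using hne
        rw [List.foldl_cons,
            show pvStep (pvStepW pvPunct o cur.reverse, false) c
              = (pvStepW pvPunct o cur.reverse, !(pvStepW pvPunct o cur.reverse).isEmpty) by
              simp [pvStep, hs, hoe]]
        rw [show PySem.Chars.split₀.go (c :: rest) cur []
              = PySem.Chars.split₀.go rest [] [cur.reverse] by
              rw [pv_go_cons]; simp [hs, hc],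
            pv_go_acc rest [] [cur.reverse]]
        simp only [List.reverse_cons, List.reverse_nil, List.nil_append]
        rw [List.foldl_append]
        simp only [List.foldl_cons, List.foldl_nil]
        exact ih0 (pvStepW pvPunct o cur.reverse)
      · rw [List.foldl_cons,
            show pvStep (pvStepW pvPunct o cur.reverse, false) c
              = (pvStepW pvPunct o cur.reverse ++ [c], false) by
              simp [pvStep, hs]]
        rw [show pvStepW pvPunct o cur.reverse ++ [c]
              = pvStepW pvPunct o (c :: cur).reverse by
              rw [List.reverse_cons, pv_stepW_append pvPunct o cur.reverse [c] (by simpa using hcur)],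
            show PySem.Chars.split₀.go (c :: rest) cur []
              = PySem.Chars.split₀.go rest (c :: cur) [] by
              rw [pv_go_cons]; simp [hs]]
        exact ih1 (c :: cur) o (by simp)

-- the outer fold over lines
theorem pv_outer : ∀ (lines : List (List (String × String))) (o : List Char),
    lines.foldl (fun st line =>
        let st := (pvGetText line).toList.foldl pvStep st
        (st.1, st.2 || !st.1.isEmpty)) (o, !o.isEmpty) =
    (let W := List.foldl (pvStepW pvPunct) o
        (lines.flatMap (fun l => PySem.Chars.split₀ (pvGetText l).toList))
     (W, !W.isEmpty)) := by
  intro lines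
  induction lines with
  | nil => intro o; simp
  | cons l ls ih =>
    intro o
    rw [List.foldl_cons]
    have h1 : ((pvGetText l).toList.foldl pvStep (o, !o.isEmpty)).1
        = List.foldl (pvStepW pvPunct) o (PySem.Chars.split₀ (pvGetText l).toList) :=
      (pv_machine (pvGetText l).toList).1 o
    -- the step's result: second component becomes (new sep) || !isEmpty; rewrite the whole pair
    -- invariant: sep = true → out ≠ [] through the inner fold
    have hinv : ∀ (t : List Char) (st : List Char × Bool), (st.2 = true → st.1 ≠ []) →
        ((t.foldl pvStep st).2 = true → (t.foldl pvStep st).1 ≠ []) := by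
      intro t
      induction t with
      | nil => intro st h; exact h
      | cons c r ihr =>
        intro st h
        rw [List.foldl_cons]
        refine ihr (pvStep st c) ?_
        unfold pvStep
        split_ifs with h1 h2 h3
        · intro hb
          simp only at hb
          rcases Bool.or_eq_true_iff.mp hb with hb | hb
          · exact h hb
          · simpa [List.isEmpty_iff] using hb
        · simp
        · simp
        · simp
    have hpair : ∀ st : List Char × Bool, (st.2 = true → st.1 ≠ []) →
        (st.1, st.2 || !st.1.isEmpty) = (st.1, !st.1.isEmpty) := by
      intro st h
      cases hb : st.2 with
      | false => simp
      | true =>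
        have := h hb
        simp [List.isEmpty_iff, this]
    set st1 := (pvGetText l).toList.foldl pvStep (o, !o.isEmpty) with hst1
    have hstinv : st1.2 = true → st1.1 ≠ [] := by
      refine hinv (pvGetText l).toList (o, !o.isEmpty) ?_
      intro hb
      simpa [List.isEmpty_iff] using hb
    show List.foldl _ (st1.1, st1.2 || !st1.1.isEmpty) ls = _
    rw [hpair st1 hstinv, h1,
        ih (List.foldl (pvStepW pvPunct) o (PySem.Chars.split₀ (pvGetText l).toList))]
    simp only [List.flatMap_cons, List.foldl_append]

-- ---- A-side: the row is join of all words (from the earlier pipeline shape) ----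

theorem pv_ic_ne_nil (sep w : List Char) (ws : List (List Char)) (hw : w ≠ []) :
    List.intercalate sep (w :: ws) ≠ [] := by
  cases ws with
  | nil => simpa [List.intercalate]
  | cons y zs => rw [pv_ic_cons sep w _ (by simp)]; simp [hw]

theorem pv_ic_nil_iff (sep : List Char) (ws : List (List Char)) (h : ∀ w ∈ ws, w ≠ []) :
    List.intercalate sep ws = [] ↔ ws = [] := by
  constructor
  · intro he
    by_contra hne
    obtain ⟨w, ws', rfl⟩ := List.exists_cons_of_ne_nil hne
    exact pv_ic_ne_nil sep w ws' (h w (by simp)) he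
  · rintro rfl; simp [List.intercalate]

theorem pv_ic_append (sep : List Char) (a b : List (List Char)) (ha : a ≠ []) (hb : b ≠ []) :
    List.intercalate sep (a ++ b) = List.intercalate sep a ++ sep ++ List.intercalate sep b := by
  induction a with
  | nil => exact absurd rfl ha
  | cons x a' ih =>
    cases a' with
    | nil =>
      obtain ⟨y, b', rfl⟩ := List.exists_cons_of_ne_nil hb
      rw [List.singleton_append, pv_ic_cons sep x _ (by simp)]
      simp [List.intercalate]
    | cons z a'' =>
      rw [List.cons_append, pv_ic_cons sep x _ (by simp),
          pv_ic_cons sep x (z :: a'') (by simp), ih (by simp)]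
      simp [List.append_assoc]

theorem pv_join_flat (sep : List Char) (wss : List (List (List Char)))
    (h : ∀ ws ∈ wss, ∀ w ∈ ws, w ≠ []) :
    List.intercalate sep (((wss.map (List.intercalate sep)).filter (fun t => t ≠ []))) =
    List.intercalate sep wss.flatten := by
  induction wss with
  | nil => simp
  | cons ws rest ih =>
    have hws : ∀ w ∈ ws, w ≠ [] := h ws (by simp)
    have hrest : ∀ ws' ∈ rest, ∀ w ∈ ws', w ≠ [] := fun ws' h1 => h ws' (by simp [h1])
    have hiff : ∀ ws' ∈ rest, (List.intercalate sep ws' = [] ↔ ws' = []) :=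
      fun ws' h1 => pv_ic_nil_iff sep ws' (hrest ws' h1)
    by_cases hnil : ws = []
    · subst hnil
      simpa [List.intercalate] using ih hrest
    · have ht : List.intercalate sep ws ≠ [] := fun he => hnil ((pv_ic_nil_iff sep ws hws).mp he)
      by_cases hfr : (rest.map (List.intercalate sep)).filter (fun t => t ≠ []) = []
      · have hall : ∀ ws' ∈ rest, ws' = [] := by
          intro ws' h1
          have := List.filter_eq_nil_iff.mp hfr (List.intercalate sep ws') (List.mem_map_of_mem h1)
          exact (hiff ws' h1).mp (by simpa using this)
        have hflat : rest.flatten = [] := List.flatten_eq_nil_iff.mpr hall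
        rw [List.map_cons, List.filter_cons_of_pos (by simpa using ht), hfr,
            List.flatten_cons, hflat, List.append_nil]
        simp [List.intercalate]
      · have hflat : rest.flatten ≠ [] := by
          intro hfl
          apply hfr
          refine List.filter_eq_nil_iff.mpr ?_
          intro x hx
          obtain ⟨ws', h1, rfl⟩ := List.mem_map.mp hx
          have := List.flatten_eq_nil_iff.mp hfl ws' h1
          simp [(hiff ws' h1).mpr this]
        rw [List.map_cons, List.filter_cons_of_pos (by simpa using ht),
            pv_ic_cons sep _ _ hfr, ih hrest, List.flatten_cons,
            pv_ic_append sep ws rest.flatten hnil hflat]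

theorem pv_toList_T (l : List (String × String)) :
    (PySem.Str.join " " (PySem.Str.split₀ (pvGetText l))).toList
      = List.intercalate (" ".toList) (PySem.Chars.split₀ (pvGetText l).toList) := by
  simp [PySem.Str.toList_join, PySem.Str.split₀_map_toList, PySem.Chars.join]

theorem pv_mapfilter (lines : List (List (String × String))) :
    ((lines.map (fun l => PySem.Str.join " " (PySem.Str.split₀ (pvGetText l)))).filter
        (fun t => t ≠ "")).map String.toList
      = ((lines.map (fun l => PySem.Chars.split₀ (pvGetText l).toList)).map
          (List.intercalate (" ".toList))).filter (fun t => t ≠ []) := by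
  induction lines with
  | nil => simp
  | cons l ls ih =>
    have h1 := pv_toList_T l
    simp only [List.map_cons, List.filter_cons]
    by_cases h : PySem.Str.join " " (PySem.Str.split₀ (pvGetText l)) = ""
    · have h2 : List.intercalate (" ".toList) (PySem.Chars.split₀ (pvGetText l).toList) = [] := by
        rw [← h1, h]; rfl
      rw [if_neg (by simp [h]), if_neg (by simpa using h2), ih]
    · have h2 : List.intercalate (" ".toList) (PySem.Chars.split₀ (pvGetText l).toList) ≠ [] := by
        rw [← h1]
        intro he
        apply h
        rw [← String.toList_inj]
        simp [he]
      rw [if_pos (by simp [h]), if_pos (by simpa using h2), List.map_cons, ih, h1]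

theorem pv_key (lines : List (List (String × String))) :
    (PySem.Str.join " "
      ((lines.map (fun l => PySem.Str.join " " (PySem.Str.split₀ (pvGetText l)))).filter
        (fun t => t ≠ ""))).toList =
    List.intercalate [' ']
      (lines.flatMap (fun l => PySem.Chars.split₀ (pvGetText l).toList)) := by
  rw [PySem.Str.toList_join]
  have hmapflat : (lines.flatMap (fun l => PySem.Chars.split₀ (pvGetText l).toList))
      = (lines.map (fun l => PySem.Chars.split₀ (pvGetText l).toList)).flatten := by
    simp [List.flatMap_def]
  rw [pv_mapfilter, hmapflat]
  have := pv_join_flat (" ".toList) (lines.map (fun l => PySem.Chars.split₀ (pvGetText l).toList)) (by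
    intro ws hws w hw
    obtain ⟨l, _, rfl⟩ := List.mem_map.mp hws
    exact pv_split₀_ne_nil _ w hw)
  simpa using this

theorem pv_foldA (T : List (String × String) → String)
    (lines : List (List (String × String))) (acc : List String) :
    lines.foldl (fun parts line =>
        let text := T line
        if text ≠ "" then parts ++ [text] else parts) acc
      = acc ++ (lines.map T).filter (fun t => t ≠ "") := by
  induction lines generalizing acc with
  | nil => simp
  | cons l ls ih =>
    by_cases h : T l = ""
    · simpa [h] using ih acc
    · simpa [h, List.append_assoc] using ih (acc ++ [T l])

-- ===== VERDICT (by name: the statement is the Claim_ definition above) =====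
theorem normalize_row_text_spec : Claim_equal_normalize_row_text := by
  intro lines _
  unfold Spec_normalize_row_text
  set words := lines.flatMap (fun l => PySem.Chars.split₀ (pvGetText l).toList) with hwordsdef
  have hwords : ∀ w ∈ words, w ≠ [] ∧ ∀ c ∈ w, PySem.Chars.isspace c = false := by
    intro w hw
    rw [hwordsdef, List.mem_flatMap] at hw
    obtain ⟨l, _, hw⟩ := hw
    exact ⟨pv_split₀_ne_nil _ w hw, pv_split₀_nonspace _ w hw⟩
  -- B side
  have hB : (normalize_row_text_alt lines).toList = List.foldl (pvStepW pvPunct) [] words := by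
    unfold normalize_row_text_alt
    have h0 : (([], false) : List Char × Bool) = (([] : List Char), !([] : List Char).isEmpty) := by
      simp
    rw [h0, pv_outer lines []]
    simp [hwordsdef]
  -- A side
  have hA : (normalize_row_text lines).toList
      = pvDel ':' (pvDel ';' (pvDel '.' (pvDel ',' (List.intercalate [' '] words)))) := by
    unfold normalize_row_text
    simp only [pv_foldA, List.nil_append]
    rw [PySem.Str.toList_replace, PySem.Str.toList_replace, PySem.Str.toList_replace,
        PySem.Str.toList_replace]
    rw [show (" ,".toList) = [' ', ','] from rfl, show (",".toList) = [','] from rfl,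
        show (" .".toList) = [' ', '.'] from rfl, show (".".toList) = ['.'] from rfl,
        show (" ;".toList) = [' ', ';'] from rfl, show (";".toList) = [';'] from rfl,
        show (" :".toList) = [' ', ':'] from rfl, show (":".toList) = [':'] from rfl]
    rw [pv_replace_eq_del, pv_replace_eq_del, pv_replace_eq_del, pv_replace_eq_del,
        pv_key lines]
  -- both equal the common normal form
  rw [← String.toList_inj, hB, hA]
  rw [pv_ic_eq_joinF words,
      pv_del_joinF ',' _ words hwords,
      pv_del_joinF '.' _ words hwords,
      pv_del_joinF ';' _ words hwords,
      pv_del_joinF ':' _ words hwords,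
      pv_foldl_stepW_nil pvPunct words (fun w hw => (hwords w hw).1)]
  have hP : (fun c => (((((fun _ => false) c || c == ',') || c == '.') || c == ';') || c == ':'))
      = pvPunct := by
    funext c
    simp [pvPunct]
  rw [hP]
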